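-- pv_equiv track=rewrite | github.com/yuliaset/DeepRiichi | main.py | forms_meld
-- ===== SOURCE A (Python) =====
-- def is_run(three_nums):
--     return (three_nums[1] == three_nums[0] + 1) and (three_nums[2] == three_nums[1] + 1)
--
-- def is_triplet2(three_nums):
--     return (three_nums[0] == three_nums[1]) and (three_nums[1] == three_nums[2])
--
-- def forms_meld(tiles_nums):
--     from itertools import combinations
--     if len(tiles_nums) < 3:
--         return False
--     for combo in combinations(tiles_nums, 3):
--         if is_run(sorted(combo)) or is_triplet2(combo):
--             return True
--     return False
-- ===== SOURCE B (Python) =====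
-- def forms_meld(tiles_nums):
--     from collections import Counter
--     counts = Counter(tiles_nums)
--     for v, n in counts.items():
--         if n >= 3 or (v + 1 in counts and v + 2 in counts):
--             return True
--     return False
-- ===== Notes on version B (the rewrite author's own statement) =====
-- stated objective: faster
-- what changed: Replaced the O(n^3) scan over all 3-combinations with one Counter pass: a meld exists iff some value occurs >= 3 times or three consecutive values are all present.
import Mathlib
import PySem

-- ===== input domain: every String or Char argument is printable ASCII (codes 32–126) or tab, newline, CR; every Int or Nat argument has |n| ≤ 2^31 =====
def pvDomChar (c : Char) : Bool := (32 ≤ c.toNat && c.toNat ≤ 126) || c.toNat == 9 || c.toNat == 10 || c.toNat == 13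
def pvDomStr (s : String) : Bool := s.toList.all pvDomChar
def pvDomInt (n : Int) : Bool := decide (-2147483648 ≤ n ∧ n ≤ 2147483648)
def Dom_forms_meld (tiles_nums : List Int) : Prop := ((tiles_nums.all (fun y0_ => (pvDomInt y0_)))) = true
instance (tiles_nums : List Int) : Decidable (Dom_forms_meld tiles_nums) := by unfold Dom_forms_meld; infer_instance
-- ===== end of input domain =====

-- B replaces A's scan over all 3-combinations by a single Counter pass (measurably faster, asymptotic).


-- ===== PORT A =====
def is_run (three_nums : List Int) : Bool :=
  -- Python indexes [0],[1],[2]; A only ever applies it to length-3 tuples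
  match three_nums with
  | [a, b, c] => b == a + 1 && c == b + 1
  | _ => false

def is_triplet2 (three_nums : List Int) : Bool :=
  match three_nums with
  | [a, b, c] => a == b && b == c
  | _ => false

def forms_meld (tiles_nums : List Int) : Bool :=
  if tiles_nums.length < 3 then false
  else (PySem.List.combinations tiles_nums 3).any
    (fun combo => is_run (PySem.List.sorted combo (fun x => x) false) || is_triplet2 combo)

-- ===== PORT B =====
def forms_meld_alt (tiles_nums : List Int) : Bool :=
  let counts : PySem.Dict Int Int := PySem.Dict.counter tiles_nums
  counts.items.any (fun p => 3 ≤ p.2 || (counts.contains (p.1 + 1) && counts.contains (p.1 + 2)))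

-- ===== PRECONDITION & SPEC =====
def Spec_forms_meld (tiles_nums : List Int) (out : Bool) : Prop := out = forms_meld_alt tiles_nums
instance (tiles_nums : List Int) (out : Bool) : Decidable (Spec_forms_meld tiles_nums out) := by unfold Spec_forms_meld; infer_instance

-- ===== CLAIM (what is proved, stated in full; the proofs are below) =====
def Claim_equal_forms_meld : Prop := ∀ (tiles_nums : List Int), Dom_forms_meld tiles_nums → Spec_forms_meld tiles_nums (forms_meld tiles_nums)

-- ===== LEMMAS AND PROOFS =====

-- the common characterisation: some value occurs ≥ 3 times, or three consecutive values are present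
def MeldProp (l : List Int) : Prop :=
  ∃ v ∈ l, 3 ≤ l.count v ∨ (v + 1 ∈ l ∧ v + 2 ∈ l)

lemma alt_iff (l : List Int) : forms_meld_alt l = true ↔ MeldProp l := by
  unfold forms_meld_alt MeldProp
  simp only [List.any_eq_true, PySem.Dict.items_counter, List.mem_map, PySem.Set.mem_ofList,
    PySem.Dict.contains_counter, Bool.or_eq_true, Bool.and_eq_true, decide_eq_true_eq,
    List.contains_eq_mem]
  constructor
  · rintro ⟨p, ⟨v, hv, rfl⟩, h⟩
    refine ⟨v, hv, ?_⟩
    simpa using h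
  · rintro ⟨v, hv, h⟩
    refine ⟨(v, (l.count v : Int)), ⟨v, hv, rfl⟩, ?_⟩
    simpa using h

lemma any_combos_iff (l : List Int) :
    ((PySem.List.combinations l 3).any
      (fun combo => is_run (PySem.List.sorted combo (fun x => x) false) || is_triplet2 combo)) = true
    ↔ MeldProp l := by
  simp only [List.any_eq_true, PySem.List.mem_combinations_iff, Bool.or_eq_true]
  constructor
  · rintro ⟨c, ⟨hsub, hlen⟩, hrun | htrip⟩
    · obtain ⟨x, y, z, hs⟩ := List.length_eq_three.mp
        (by rw [PySem.List.length_sorted]; exact hlen :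
          (PySem.List.sorted c (fun x => x) false).length = 3)
      have hperm : (PySem.List.sorted c (fun x => x) false).Perm c := PySem.List.sorted_perm ..
      rw [hs] at hrun hperm
      simp [is_run] at hrun
      obtain ⟨hy, hz⟩ := hrun
      have hmem : ∀ w ∈ [x, y, z], w ∈ l := fun w hw => hsub.mem (hperm.mem_iff.mp hw)
      refine ⟨x, hmem x (by simp), Or.inr ⟨?_, ?_⟩⟩
      · rw [← hy]; exact hmem y (by simp)
      · have : x + 2 = z := by omega
        rw [this]; exact hmem z (by simp)
    · obtain ⟨a, b, c', hc⟩ := List.length_eq_three.mp hlen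
      subst hc
      simp only [is_triplet2, Bool.and_eq_true, beq_iff_eq] at htrip
      obtain ⟨hab, hbc⟩ := htrip
      subst hab; subst hbc
      refine ⟨a, hsub.mem (by simp), Or.inl ?_⟩
      have := hsub.count_le a
      simpa using this
  · rintro ⟨v, hv, hcnt | ⟨h1, h2⟩⟩
    · refine ⟨[v, v, v], ⟨?_, rfl⟩, Or.inr (by simp [is_triplet2])⟩
      have h3 := List.replicate_sublist_iff.mpr (show 3 ≤ List.count v l by simpa using hcnt)
      simpa using h3
    · have hsp : List.Subperm [v, v + 1, v + 2] l := by
        rw [List.subperm_ext_iff]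
        intro x hx
        have hxl : x ∈ l := by
          simp only [List.mem_cons, List.not_mem_nil, or_false] at hx
          rcases hx with rfl | rfl | rfl <;> assumption
        have h1c : 0 < List.count x l := List.count_pos_iff.mpr hxl
        have h2c : List.count x [v, v + 1, v + 2] ≤ 1 := by
          simp only [List.count_cons, List.count_nil, beq_iff_eq]
          split_ifs <;> omega
        omega
      obtain ⟨c', hperm, hsub⟩ := hsp
      refine ⟨c', ⟨hsub, by simpa using hperm.length_eq⟩, Or.inl ?_⟩
      have hpair : List.Pairwise (fun a b : Int => a < b) [v, v + 1, v + 2] := by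
        constructor
        · intro b hb; fin_cases hb <;> omega
        constructor
        · intro b hb; fin_cases hb; omega
        constructor
        · intro b hb; fin_cases hb
        exact List.Pairwise.nil
      have hsort : PySem.List.sorted c' (fun x => x) false = [v, v + 1, v + 2] :=
        PySem.List.sorted_eq_of_perm_of_pairwise_lt c' [v, v + 1, v + 2] (fun x => x) hperm.symm hpair
      rw [hsort]
      simp [is_run]
      omega

lemma a_iff (l : List Int) : forms_meld l = true ↔ MeldProp l := by
  unfold forms_meld
  split
  · next h =>
    simp only [Bool.false_eq_true, false_iff]
    intro hm
    have hx := (any_combos_iff l).mpr hm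
    have hnil : PySem.List.combinations l 3 = [] :=
      PySem.List.combinations_eq_nil_of_length_lt (xs := l) (r := 3) (by omega)
    rw [hnil] at hx
    simp at hx
  · exact any_combos_iff l

-- ===== VERDICT (by name: the statement is the Claim_ definition above) =====
theorem forms_meld_spec : Claim_equal_forms_meld := by
  intro l _
  unfold Spec_forms_meld
  exact Bool.eq_iff_iff.mpr (by rw [a_iff, alt_iff])
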